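-- pv_equiv track=rewrite | github.com/aaronmatson1/cs-module-project-hash-tables | hashtable/hashtable.py | djb2
-- ===== SOURCE A (Python) =====
-- def djb2(key):
--     """
--     DJB2 hash, 32-bit
--
--     Implement this, and/or FNV-1.
--     """
--     # Your code here
--     hash = 5381
--     for x in key:
--         hash = (( hash << 5) + hash) + ord(x)
--     return hash
--
--     """ This function is based off of integer arithmatic using the string values.
--     So what does it do? and why 5381. Well, It's a prime number and it works pretty darn well.
--     Why 33? No clue. """
-- ===== SOURCE B (Python) =====
-- def djb2(key):
--     # Positional-polynomial DJB2: closed-form leading term 5381*33**n, then the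
--     # character terms ord(c)*33**position accumulated back-to-front with a running power.
--     n = len(key)
--     total = 5381 * 33**n
--     p = 1
--     for c in reversed(key):
--         total += ord(c) * p
--         p *= 33
--     return total
-- ===== Notes on version B (the rewrite author's own statement) =====
-- stated objective: alternative
-- what changed: Replaces the incremental Horner fold ((h<<5)+h)+ord(c) with a positional polynomial evaluation: the closed-form leading term 5381*33**n plus the character terms ord(c)*33**position accumulated back-to-front with a running power.
import Mathlib
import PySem

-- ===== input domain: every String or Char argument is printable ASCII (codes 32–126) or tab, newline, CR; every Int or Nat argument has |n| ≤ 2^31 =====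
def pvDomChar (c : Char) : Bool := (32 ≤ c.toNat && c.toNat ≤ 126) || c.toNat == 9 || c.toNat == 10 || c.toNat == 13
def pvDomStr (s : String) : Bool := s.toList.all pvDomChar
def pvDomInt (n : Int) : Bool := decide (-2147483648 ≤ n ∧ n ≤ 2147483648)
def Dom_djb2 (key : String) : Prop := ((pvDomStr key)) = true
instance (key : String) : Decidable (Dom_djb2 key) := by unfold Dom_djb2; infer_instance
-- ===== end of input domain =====

-- B evaluates the DJB2 polynomial positionally (closed-form leading term 5381*33^n plus a
-- back-to-front pass with a running power) instead of A's incremental Horner fold; objective: alternative.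

-- ===== PORT A =====
def djb2 (key : String) : Int :=
  key.toList.foldl (fun (hash : Int) x => ((hash <<< (5:Nat)) + hash) + (x.toNat : Int)) 5381

-- ===== PORT B =====
def djb2_alt (key : String) : Int :=
  let l := key.toList
  let n := l.length
  (l.reverse.foldl (fun (st : Int × Int) c => (st.1 + (c.toNat : Int) * st.2, st.2 * 33))
    (5381 * 33 ^ n, 1)).1

-- ===== PRECONDITION & SPEC =====
def Spec_djb2 (key : String) (out : Int) : Prop := out = djb2_alt key
instance (key : String) (out : Int) : Decidable (Spec_djb2 key out) := by unfold Spec_djb2; infer_instance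

-- ===== CLAIM (what is proved, stated in full; the proofs are below) =====
def Claim_equal_djb2 : Prop := ∀ (key : String), Dom_djb2 key → Spec_djb2 key (djb2 key)

-- ===== LEMMAS AND PROOFS =====

-- ===== VERDICT (by name: the statement is the Claim_ definition above) =====
-- pvPoly l = low-order part of the DJB2 polynomial for suffix l (head has the highest power)
def pvPoly (l : List Char) : Int :=
  match l with
  | [] => 0
  | c :: t => (c.toNat : Int) * 33 ^ t.length + pvPoly t

-- pvPolyRev m = the same sum read positionally: ord(m[k]) * 33^k
def pvPolyRev (m : List Char) : Int :=
  match m with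
  | [] => 0
  | c :: t => (c.toNat : Int) + 33 * pvPolyRev t

theorem pvFoldl_eq (l : List Char) (acc : Int) :
    l.foldl (fun (hash : Int) x => ((hash <<< (5:Nat)) + hash) + (x.toNat : Int)) acc
      = acc * 33 ^ l.length + pvPoly l := by
  induction l generalizing acc with
  | nil => simp [pvPoly]
  | cons c t ih =>
      simp only [List.foldl_cons, ih, pvPoly, List.length_cons]
      have : (acc <<< (5:Nat)) = acc * 32 := by
        rw [Int.shiftLeft_eq]; norm_num
      rw [this]; ring

theorem pvFoldlRev_eq (m : List Char) (t p : Int) :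
    m.foldl (fun (st : Int × Int) c => (st.1 + (c.toNat : Int) * st.2, st.2 * 33)) (t, p)
      = (t + p * pvPolyRev m, p * 33 ^ m.length) := by
  induction m generalizing t p with
  | nil => simp [pvPolyRev]
  | cons c u ih =>
      simp only [List.foldl_cons, ih, pvPolyRev, List.length_cons]
      rw [Prod.mk.injEq]
      constructor <;> ring

theorem pvPolyRev_append_singleton (m : List Char) (c : Char) :
    pvPolyRev (m ++ [c]) = pvPolyRev m + (c.toNat : Int) * 33 ^ m.length := by
  induction m with
  | nil => simp [pvPolyRev]
  | cons d u ih => simp only [List.cons_append, pvPolyRev, ih, List.length_cons]; ring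

theorem pvPolyRev_reverse (l : List Char) : pvPolyRev l.reverse = pvPoly l := by
  induction l with
  | nil => rfl
  | cons c t ih =>
      rw [List.reverse_cons, pvPolyRev_append_singleton, ih]
      simp only [pvPoly, List.length_reverse]; ring

-- ===== VERDICT (by name: the statement is the Claim_ definition above) =====
theorem djb2_spec : Claim_equal_djb2 := by
  intro key _
  unfold Spec_djb2 djb2 djb2_alt
  simp only []
  rw [pvFoldl_eq, pvFoldlRev_eq]
  simp [pvPolyRev_reverse]
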